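-- pv_equiv track=rewrite | github.com/Levan500Skhulukhia/GOA_HW | Level 34/Homework/Main.py | count_unique_frequencies
-- ===== SOURCE A (Python) =====
-- def count_unique_frequencies(s):
--
--     counts = []
--
--     # თითოეული სიმბოლოს დათვლა
--     for char in s:
--         found = False
--         for item in counts:
--             if item[0] == char:  # თუ სიმბოლო უკვე სიაშია
--                 item[1] += 1
--                 found = True
--                 break
--         if not found:  # თუ სიმბოლო სიაში ჯერ არ არის
--             counts.append([char, 1])
--
--     # უნიკალური რაოდენობების სიის შექმნა
--     unique_counts = []
--     for item in counts:
--         if item[1] not in unique_counts:  # თუ რაოდენობა ჯერ არ არის სიაში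
--             unique_counts.append(item[1])
--
--     # სორტირება
--     unique_counts.sort()
--     return unique_counts
-- ===== SOURCE B (Python) =====
-- def count_unique_frequencies(s):
--     # Sort the characters, then scan once: equal characters form consecutive
--     # runs, so each run length is that character's frequency.  Collect the
--     # distinct run lengths in a set and return them sorted.
--     t = sorted(s)
--     lengths = set()
--     i = 0
--     while i < len(t):
--         j = i
--         while j < len(t) and t[j] == t[i]:
--             j += 1
--         lengths.add(j - i)
--         i = j
--     return sorted(lengths)
-- ===== Notes on version B (the rewrite author's own statement) =====
-- stated objective: alternative
-- what changed: Replaces A's assoc-list counting (inner scan of the counts list per character) and membership-based dedup by sort-then-group run-length counting collected into a set.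
import Mathlib
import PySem

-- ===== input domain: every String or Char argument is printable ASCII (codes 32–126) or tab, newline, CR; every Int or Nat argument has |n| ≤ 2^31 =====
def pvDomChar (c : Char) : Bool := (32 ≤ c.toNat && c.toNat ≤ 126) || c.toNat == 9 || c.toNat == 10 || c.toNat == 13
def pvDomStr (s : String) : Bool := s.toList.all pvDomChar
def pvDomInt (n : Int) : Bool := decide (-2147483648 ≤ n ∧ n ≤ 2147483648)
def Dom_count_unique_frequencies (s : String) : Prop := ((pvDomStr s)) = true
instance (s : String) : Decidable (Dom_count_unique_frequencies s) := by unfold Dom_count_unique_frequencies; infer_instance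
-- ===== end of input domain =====

-- B counts by sorting the characters and measuring runs of equal characters (a genuinely different algorithm of similar cost), instead of A's assoc-list accumulation.

-- ===== PORT A =====
-- the inner loop 'for item in counts: if item[0]==char: item[1]+=1; break' + the not-found append
def pvBump : List (Char × Int) → Char → List (Char × Int)
  | [], ch => [(ch, 1)]
  | (c, n) :: rest, ch => if c == ch then (c, n + 1) :: rest else (c, n) :: pvBump rest ch

def count_unique_frequencies (s : String) : List Int :=
  let counts := s.toList.foldl pvBump []
  let unique := counts.foldl (fun acc item => if item.2 ∈ acc then acc else acc ++ [item.2]) []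
  PySem.List.sorted unique (fun x => x) false

-- ===== PORT B =====
-- Source B's outer while loop over the sorted characters; the inner 'while t[j]==t[i]' scan is the
-- maximal run of the character at position i (takeWhile), and i jumps to its end (dropWhile)
def pvRuns : List Char → List Int
  | [] => []
  | c :: rest =>
    ((((c :: rest).takeWhile (fun x => x == c)).length : Int)) ::
      pvRuns ((c :: rest).dropWhile (fun x => x == c))
  termination_by l => l.length
  decreasing_by
    simp only [List.dropWhile, beq_self_eq_true]
    exact Nat.lt_succ_of_le (List.length_dropWhile_le _ _)

def count_unique_frequencies_alt (s : String) : List Int :=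
  let t := PySem.List.sorted s.toList (fun x => x) false
  let lengths : PySem.Set Int := PySem.Set.ofList (pvRuns t)
  PySem.List.sorted lengths (fun x => x) false

-- ===== PRECONDITION & SPEC =====
def Spec_count_unique_frequencies (s : String) (out : List Int) : Prop := out = count_unique_frequencies_alt s
instance (s : String) (out : List Int) : Decidable (Spec_count_unique_frequencies s out) := by unfold Spec_count_unique_frequencies; infer_instance

-- ===== CLAIM (what is proved, stated in full; the proofs are below) =====
def Claim_equal_count_unique_frequencies : Prop := ∀ (s : String), Dom_count_unique_frequencies s → Spec_count_unique_frequencies s (count_unique_frequencies s)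

-- ===== LEMMAS AND PROOFS =====

theorem pvBump_map_mem (ds : List Char) (g : Char → Int) (ch : Char)
    (hnd : ds.Nodup) (hm : ch ∈ ds) :
    pvBump (ds.map (fun c => (c, g c))) ch
      = ds.map (fun c => (c, g c + if c = ch then 1 else 0)) := by
  induction ds with
  | nil => cases hm
  | cons d ds ih =>
    simp only [List.map_cons, pvBump]
    by_cases hd : d = ch
    · subst hd
      simp only [beq_self_eq_true, if_true]
      congr 1
      apply List.map_congr_left
      intro c hc
      have hne : c ≠ d := fun h => (List.nodup_cons.mp hnd).1 (h ▸ hc)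
      simp [hne]
    · have hm' : ch ∈ ds := by
        rcases List.mem_cons.mp hm with h | h
        · exact absurd h.symm hd
        · exact h
      rw [if_neg (by simp [hd])]
      rw [ih (List.nodup_cons.mp hnd).2 hm']
      simp [hd]

theorem pvBump_map_not_mem (ds : List Char) (g : Char → Int) (ch : Char) (hm : ch ∉ ds) :
    pvBump (ds.map (fun c => (c, g c))) ch = ds.map (fun c => (c, g c)) ++ [(ch, 1)] := by
  induction ds with
  | nil => rfl
  | cons d ds ih =>
    have hd : ¬ (d = ch) := fun h => hm (h ▸ List.mem_cons_self)
    simp only [List.map_cons, pvBump, if_neg (by simp [hd] : ¬ (d == ch) = true)]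
    rw [ih (fun h => hm (List.mem_cons_of_mem _ h))]
    simp

theorem pvBump_of_counts (l : List Char) (ch : Char) :
    pvBump ((PySem.List.dedup l).map (fun c => (c, (l.count c : Int)))) ch
      = (PySem.List.dedup (l ++ [ch])).map (fun c => (c, ((l ++ [ch]).count c : Int))) := by
  have hded : PySem.List.dedup (l ++ [ch])
      = if ch ∈ PySem.List.dedup l then PySem.List.dedup l else PySem.List.dedup l ++ [ch] := by
    simp only [PySem.List.dedup_eq_ofList, PySem.Set.ofList_append_singleton,
      PySem.Set.add_eq_ite]
  have hcount : ∀ c : Char, ((l ++ [ch]).count c : Int)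
      = (l.count c : Int) + if c = ch then 1 else 0 := by
    intro c
    rw [List.count_append]
    push_cast
    by_cases h : c = ch
    · subst h; simp
    · simp [h, Ne.symm h]
  by_cases hm : ch ∈ l
  · have hm' : ch ∈ PySem.List.dedup l := (PySem.List.mem_dedup _ _).mpr hm
    rw [hded, if_pos hm']
    rw [pvBump_map_mem _ _ _ (PySem.List.nodup_dedup l) hm']
    apply List.map_congr_left
    intro c _
    rw [hcount c]
  · have hm' : ch ∉ PySem.List.dedup l := fun h => hm ((PySem.List.mem_dedup _ _).mp h)
    rw [hded, if_neg hm']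
    rw [pvBump_map_not_mem _ _ _ hm']
    simp only [List.map_append, List.map_cons, List.map_nil]
    congr 1
    · apply List.map_congr_left
      intro c hc
      have hne : c ≠ ch := fun h => hm' (h ▸ hc)
      rw [hcount c]
      simp [hne]
    · simp [List.count_eq_zero_of_not_mem hm]

theorem countsA_eq (l : List Char) :
    l.foldl pvBump [] = (PySem.List.dedup l).map (fun c => (c, (l.count c : Int))) := by
  induction l using List.reverseRecOn with
  | nil => rfl
  | append_singleton l ch ih =>
    rw [List.foldl_append, List.foldl_cons, List.foldl_nil, ih, pvBump_of_counts]

theorem mem_pvRuns : ∀ (l : List Char), l.Pairwise (fun a b => a ≤ b) →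
    ∀ k : Int, (k ∈ pvRuns l ↔ ∃ c ∈ l, (l.count c : Int) = k) := by
  intro l
  induction l using pvRuns.induct with
  | case1 => intro _ k; simp [pvRuns]
  | case2 c rest ih =>
    intro h k
    set L := c :: rest with hL
    set T := L.takeWhile (fun x => x == c) with hT
    set D := L.dropWhile (fun x => x == c) with hD
    have hTD : T ++ D = L := List.takeWhile_append_dropWhile
    have hTall : ∀ x ∈ T, x = c := by
      intro x hx
      have := List.mem_takeWhile_imp hx
      exact beq_iff_eq.mp this
    have hcD : c ∉ D := by
      intro hcd
      have hDne : D ≠ [] := by intro h0; rw [h0] at hcd; cases hcd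
      obtain ⟨d, D', hDeq⟩ := List.exists_cons_of_ne_nil hDne
      have hdhead : ((D.head hDne) == c) = false := List.head_dropWhile_not _ hDne
      have hheadd : D.head hDne = d := by simp [hDeq]
      have hdne : d ≠ c := by
        intro h0; rw [hheadd, h0] at hdhead; simp at hdhead
      have hpair : (T ++ D).Pairwise (fun a b => a ≤ b) := by rw [hTD]; exact h
      have hpairD0 : D.Pairwise (fun a b => a ≤ b) := (List.pairwise_append.mp hpair).2.1
      have hcT : c ∈ T := by
        rw [hT, hL]
        simp [List.takeWhile]
      have hle : c ≤ d := by
        have := (List.pairwise_append.mp hpair).2.2 c hcT d (by rw [hDeq]; exact List.mem_cons_self)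
        exact this
      rw [hDeq] at hcd
      rcases List.mem_cons.mp hcd with h0 | htl
      · exact hdne h0.symm
      · have hge : d ≤ c := by
          rw [hDeq] at hpairD0
          exact (List.pairwise_cons.mp hpairD0).1 c htl
        exact hdne (le_antisymm hge hle)
    have hpairD : D.Pairwise (fun a b => a ≤ b) := by
      have hpair : (T ++ D).Pairwise (fun a b => a ≤ b) := by rw [hTD]; exact h
      exact (List.pairwise_append.mp hpair).2.1
    have hcountT : T.count c = T.length := by
      rw [List.count_eq_length.mpr]
      intro x hx; exact (hTall x hx).symm
    have hcountcL : L.count c = T.length := by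
      rw [← hTD, List.count_append, List.count_eq_zero_of_not_mem hcD, hcountT]
      omega
    have hcountD : ∀ c' ∈ D, L.count c' = D.count c' := by
      intro c' hc'
      have hne : c' ≠ c := fun h0 => hcD (h0 ▸ hc')
      rw [← hTD, List.count_append, List.count_eq_zero_of_not_mem, Nat.zero_add]
      intro hmem; exact hne (hTall _ hmem)
    rw [pvRuns]
    simp only [List.mem_cons]
    constructor
    · rintro (rfl | hk)
      · exact ⟨c, List.mem_cons_self, by rw [hcountcL]⟩
      · rcases (ih hpairD k).mp hk with ⟨c', hc', hcnt⟩
        refine ⟨c', ?_, ?_⟩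
        · rw [← hTD]; exact List.mem_append_right _ hc'
        · rw [hcountD c' hc']; exact hcnt
    · rintro ⟨c', hc', hcnt⟩
      rw [← hTD] at hc'
      rcases List.mem_append.mp hc' with hT' | hD'
      · left
        rw [← hcnt, show c' = c from hTall _ hT', hcountcL]
      · right
        exact (ih hpairD k).mpr ⟨c', hD', by rw [← hcountD c' hD']; exact hcnt⟩

theorem foldl_ite_eq_add (counts : List (Char × Int)) (init : List Int) :
    counts.foldl (fun acc item => if item.2 ∈ acc then acc else acc ++ [item.2]) init
      = counts.foldl (fun s b => PySem.Set.add s b.2) init := by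
  simp only [PySem.Set.add_eq_ite]

theorem uniqueA_eq (counts : List (Char × Int)) :
    counts.foldl (fun acc item => if item.2 ∈ acc then acc else acc ++ [item.2]) []
      = PySem.Set.ofList (counts.map (fun p => p.2)) := by
  rw [foldl_ite_eq_add, ← PySem.Set.update_map_eq_foldl_add,
    PySem.Set.update_nil_left (xs := List.map Prod.snd counts)]

theorem memUA (l : List Char) (k : Int) :
    k ∈ PySem.Set.ofList (((l.foldl pvBump []).map (fun p => p.2)))
      ↔ ∃ c ∈ l, (l.count c : Int) = k := by
  rw [PySem.Set.mem_ofList, countsA_eq]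
  simp only [List.map_map, Function.comp, List.mem_map]
  constructor
  · rintro ⟨c, hc, rfl⟩
    exact ⟨c, (PySem.List.mem_dedup _ _).mp hc, rfl⟩
  · rintro ⟨c, hc, rfl⟩
    exact ⟨c, (PySem.List.mem_dedup _ _).mpr hc, rfl⟩

theorem memUB (l : List Char) (k : Int) :
    k ∈ PySem.Set.ofList (pvRuns (PySem.List.sorted l (fun x => x) false))
      ↔ ∃ c ∈ l, (l.count c : Int) = k := by
  rw [PySem.Set.mem_ofList]
  have hperm : (PySem.List.sorted l (fun x => x) false).Perm l := PySem.List.sorted_perm _ _ _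
  have hpw : (PySem.List.sorted l (fun x => x) false).Pairwise (fun a b => a ≤ b) := by
    have := PySem.List.sorted_pairwise (xs := l) (key := fun x => x)
    exact this
  rw [mem_pvRuns _ hpw k]
  constructor
  · rintro ⟨c, hc, rfl⟩
    exact ⟨c, hperm.mem_iff.mp hc, by rw [hperm.count_eq]⟩
  · rintro ⟨c, hc, rfl⟩
    exact ⟨c, hperm.mem_iff.mpr hc, by rw [hperm.count_eq]⟩

theorem ports_agree (s : String) : count_unique_frequencies s = count_unique_frequencies_alt s := by
  show PySem.List.sorted ((s.toList.foldl pvBump []).foldl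
      (fun acc item => if item.2 ∈ acc then acc else acc ++ [item.2]) []) (fun x => x) false
    = PySem.List.sorted (PySem.Set.ofList (pvRuns (PySem.List.sorted s.toList (fun x => x) false)))
        (fun x => x) false
  rw [uniqueA_eq]
  set UA : List Int := PySem.Set.ofList (((s.toList.foldl pvBump []).map (fun p => p.2))) with hUA
  set UB : List Int := PySem.Set.ofList (pvRuns (PySem.List.sorted s.toList (fun x => x) false)) with hUB
  have hmem : ∀ k, k ∈ UA ↔ k ∈ UB := fun k => (memUA s.toList k).trans (memUB s.toList k).symm
  have hp : UA.Perm UB :=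
    (List.perm_ext_iff_of_nodup (PySem.Set.nodup_ofList _) (PySem.Set.nodup_ofList _)).mpr hmem
  exact PySem.List.sorted_eq_sorted_of_perm _ _ _ (fun a b h => h) hp

-- ===== VERDICT (by name: the statement is the Claim_ definition above) =====
theorem count_unique_frequencies_spec : Claim_equal_count_unique_frequencies := by
  intro s _
  unfold Spec_count_unique_frequencies
  exact ports_agree s
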